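-- pv_equiv track=rewrite | github.com/Galina-Sokolova/Python | HW_15_10_22/Task5.py | Compose_Fibonacci_lst
-- ===== SOURCE A (Python) =====
-- def Compose_Fibonacci_lst(num):
--     lst = [0, 1]
--     i = 1
--     while i < num:
--         lst.append(lst[i-1] + lst[i])
--         i+=1
--
--     i = 0
--     k = 1
--     while i < num*2:
--         lst.insert(0, lst[i+1]*k)
--         i+=2
--         k=-k
--     return lst
-- ===== SOURCE B (Python) =====
-- def Compose_Fibonacci_lst(num):
--     # base holds F(0), F(1); for num <= 0 nothing else is produced
--     if num <= 0:
--         return [0, 1]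
--     # positive side: F(2)..F(num) by the forward recurrence
--     pos = [0, 1]
--     a, b = 0, 1
--     for _ in range(num - 1):
--         a, b = b, a + b
--         pos.append(b)
--     # negative side: F(-1)..F(-num) by the backward recurrence F(k-1) = F(k+1) - F(k)
--     neg = []
--     x, y = 0, 1
--     for _ in range(num):
--         x, y = y - x, x
--         neg.append(x)
--     neg.reverse()
--     neg += pos
--     return neg
-- ===== Notes on version B (the rewrite author's own statement) =====
-- stated objective: faster
-- what changed: B builds the positive side with a running (a,b) pair and generates the negative side independently by the backward recurrence F(k-1)=F(k+1)-F(k) with appends plus one reverse, instead of A's re-reading of the growing list by index and repeated O(n) insert(0) prepends.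
import Mathlib
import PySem

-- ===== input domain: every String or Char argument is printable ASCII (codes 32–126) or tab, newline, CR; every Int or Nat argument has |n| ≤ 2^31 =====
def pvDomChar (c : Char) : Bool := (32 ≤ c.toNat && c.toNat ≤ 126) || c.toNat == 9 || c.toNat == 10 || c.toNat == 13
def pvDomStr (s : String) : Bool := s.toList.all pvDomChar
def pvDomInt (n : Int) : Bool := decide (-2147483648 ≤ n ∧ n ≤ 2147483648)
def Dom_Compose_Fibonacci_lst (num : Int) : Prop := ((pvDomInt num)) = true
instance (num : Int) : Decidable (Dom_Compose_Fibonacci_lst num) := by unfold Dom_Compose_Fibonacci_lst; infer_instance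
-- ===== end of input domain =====

-- B replaces A's index-reads of the growing list and O(n) insert(0) prepends by two running-pair
-- recurrences (forward for F(2..num), backward F(k-1)=F(k+1)-F(k) for F(-1..-num)): measurably faster.

-- ===== PORT A =====
-- Python indices lst[i-1], lst[i], lst[i+1] are always in range here, so pyGetD is exact.
-- The Nat fuel only bounds the while-loops (it equals the remaining count at entry, so the
-- fuel-0 branch is never the one that stops the loop): structural recursion, same computation.
def fibFwdAGo (num : Int) : Nat → List Int → Int → List Int
  | 0, lst, _ => lst
  | f+1, lst, i =>
    if i < num then
      fibFwdAGo num f (lst ++ [PySem.List.pyGetD lst (i-1) 0 + PySem.List.pyGetD lst i 0]) (i+1)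
    else lst

def fibNegAGo (num : Int) : Nat → List Int → Int → Int → List Int
  | 0, lst, _, _ => lst
  | f+1, lst, i, k =>
    if i < num*2 then
      fibNegAGo num f ((PySem.List.pyGetD lst (i+1) 0 * k) :: lst) (i+2) (-k)
    else lst

def Compose_Fibonacci_lst (num : Int) : List Int :=
  fibNegAGo num (num*2).toNat (fibFwdAGo num (num - 1).toNat [0, 1] 1) 0 1

-- ===== PORT B =====
def Compose_Fibonacci_lst_alt (num : Int) : List Int :=
  if num ≤ 0 then [0, 1]
  else
    let pos := ((List.range (num - 1).toNat).foldl
      (fun (s : List Int × Int × Int) _ =>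
        (s.1 ++ [s.2.1 + s.2.2], s.2.2, s.2.1 + s.2.2)) ([0, 1], 0, 1)).1
    let neg := ((List.range num.toNat).foldl
      (fun (s : List Int × Int × Int) _ =>
        (s.1 ++ [s.2.2 - s.2.1], s.2.2 - s.2.1, s.2.1)) ([], 0, 1)).1
    neg.reverse ++ pos

-- ===== PRECONDITION & SPEC =====
def Spec_Compose_Fibonacci_lst (num : Int) (out : List Int) : Prop := out = Compose_Fibonacci_lst_alt num
instance (num : Int) (out : List Int) : Decidable (Spec_Compose_Fibonacci_lst num out) := by unfold Spec_Compose_Fibonacci_lst; infer_instance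

-- ===== CLAIM (what is proved, stated in full; the proofs are below) =====
def Claim_equal_Compose_Fibonacci_lst : Prop := ∀ (num : Int), Dom_Compose_Fibonacci_lst num → Spec_Compose_Fibonacci_lst num (Compose_Fibonacci_lst num)

-- ===== LEMMAS AND PROOFS =====

def fib : Nat → Int
  | 0 => 0
  | 1 => 1
  | (n+2) => fib n + fib (n+1)

-- positive side F(0)..F(n) as A/B produce it (the [0,1] base is there even for n = 0)
def posL (n : Nat) : List Int := 0 :: 1 :: (List.range (n-1)).map (fun j => fib (j+2))

def negItem (j : Nat) : Int := fib (j+1) * (-1)^j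

def negL (n : Nat) : List Int := ((List.range n).map negItem).reverse

def refFib (num : Int) : List Int := negL num.toNat ++ posL num.toNat

theorem posL_eq_map (n : Nat) (h : 1 ≤ n) : posL n = (List.range (n+1)).map fib := by
  obtain ⟨m, rfl⟩ := Nat.exists_eq_add_of_le' h
  simp [posL, List.range_succ_eq_map, List.map_map, Function.comp_def]
  exact ⟨rfl, rfl⟩

theorem posL_getD (n k : Nat) (hn : 1 ≤ n) (hk : k ≤ n) : (posL n).getD k 0 = fib k := by
  rw [posL_eq_map n hn]
  rw [List.getD_eq_getElem?_getD, List.getElem?_map, List.getElem?_range (by omega)]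
  rfl

theorem posL_succ (n : Nat) (hn : 1 ≤ n) : posL n ++ [fib (n+1)] = posL (n+1) := by
  obtain ⟨m, rfl⟩ := Nat.exists_eq_add_of_le' hn
  simp [posL, List.range_succ]

theorem negL_succ (j : Nat) : negItem j :: negL j = negL (j+1) := by
  simp [negL, List.range_succ]

theorem negL_length (j : Nat) : (negL j).length = j := by simp [negL]

theorem fib_add_two (n : Nat) : fib n + fib (n+1) = fib (n+2) := rfl

theorem fwdA_inv (num : Int) : ∀ (m j : Nat), 1 ≤ j → num ≤ j + m →
    fibFwdAGo num m (posL j) j = posL (max num.toNat j) := by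
  intro m
  induction m with
  | zero =>
    intro j hj hle
    simp only [fibFwdAGo]
    congr 1
    omega
  | succ m ih =>
    intro j hj hle
    simp only [fibFwdAGo]
    by_cases h : (j : Int) < num
    · rw [if_pos h]
      have h1 : ((j : Int) - 1) = ((j - 1 : Nat) : Int) := by omega
      rw [h1, PySem.List.pyGetD_natCast, PySem.List.pyGetD_natCast]
      rw [posL_getD j (j-1) hj (by omega), posL_getD j j hj (le_refl _)]
      have hrec : fib (j-1) + fib j = fib (j+1) := by
        obtain ⟨t, rfl⟩ := Nat.exists_eq_add_of_le' hj
        simpa using fib_add_two t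
      rw [hrec, posL_succ j hj]
      have h2 : ((j : Int) + 1) = ((j + 1 : Nat) : Int) := by omega
      rw [h2, ih (j+1) (by omega) (by omega)]
      congr 1
      omega
    · rw [if_neg h]
      congr 1
      omega

theorem negA_inv (num : Int) (hnum : 1 ≤ num) : ∀ (m j : Nat), num ≤ j + m → j ≤ num.toNat →
    fibNegAGo num m (negL j ++ posL num.toNat) (2*j) ((-1)^j) = negL num.toNat ++ posL num.toNat := by
  intro m
  induction m with
  | zero =>
    intro j hle hj
    simp only [fibNegAGo]
    have : j = num.toNat := by omega
    rw [this]
  | succ m ih =>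
    intro j hle hj
    simp only [fibNegAGo]
    by_cases h : 2 * (j : Int) < num*2
    · have hjn : j < num.toNat := by omega
      rw [if_pos h]
      have h1 : 2 * (j : Int) + 1 = ((2*j+1 : Nat) : Int) := by push_cast; ring
      rw [h1, PySem.List.pyGetD_natCast]
      rw [List.getD_append_right _ _ _ _ (by rw [negL_length]; omega)]
      rw [negL_length]
      have h2 : 2*j + 1 - j = j + 1 := by omega
      rw [h2, posL_getD num.toNat (j+1) (by omega) (by omega)]
      have h3 : (fib (j+1) * (-1)^j) :: (negL j ++ posL num.toNat)
          = negL (j+1) ++ posL num.toNat := by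
        rw [← negL_succ]; rfl
      rw [h3]
      have h4 : 2 * (j : Int) + 2 = 2 * ((j+1 : Nat) : Int) := by push_cast; ring
      have h5 : -((-1 : Int)^j) = (-1)^(j+1) := by ring
      rw [h4, h5, ih (j+1) (by omega) (by omega)]
    · rw [if_neg h]
      have : j = num.toNat := by omega
      rw [this]

theorem A_eq_ref (num : Int) : Compose_Fibonacci_lst num = refFib num := by
  unfold Compose_Fibonacci_lst refFib
  have hbase : ([0, 1] : List Int) = posL 1 := by simp [posL]
  rw [hbase]
  have hfwd := fwdA_inv num ((num - 1).toNat) 1 (le_refl _) (by omega)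
  rw [Nat.cast_one] at hfwd
  rw [hfwd]
  by_cases h : num ≤ 0
  · have h0 : (num*2).toNat = 0 := by omega
    rw [h0]
    simp only [fibNegAGo]
    have h1 : max num.toNat 1 = 1 := by omega
    have h2 : num.toNat = 0 := by omega
    rw [h1, h2]
    simp [posL, negL]
  · have h1 : max num.toNat 1 = num.toNat := by omega
    rw [h1]
    have := negA_inv num (by omega) ((num*2).toNat) 0 (by omega) (by omega)
    simpa [negL] using this

theorem B_pos (t : Nat) :
    (List.range t).foldl
      (fun (s : List Int × Int × Int) _ =>
        (s.1 ++ [s.2.1 + s.2.2], s.2.2, s.2.1 + s.2.2)) ([0, 1], 0, 1)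
    = (posL (t+1), fib t, fib (t+1)) := by
  induction t with
  | zero => decide
  | succ t ih =>
    rw [List.range_succ, List.foldl_append, ih]
    simp only [List.foldl_cons, List.foldl_nil]
    rw [fib_add_two, posL_succ (t+1) (by omega)]

theorem B_neg (t : Nat) :
    (List.range (t+1)).foldl
      (fun (s : List Int × Int × Int) _ =>
        (s.1 ++ [s.2.2 - s.2.1], s.2.2 - s.2.1, s.2.1)) ([], 0, 1)
    = ((List.range (t+1)).map negItem, fib (t+1) * (-1)^t, fib t * (-1)^(t+1)) := by
  induction t with
  | zero => decide
  | succ t ih =>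
    rw [List.range_succ, List.foldl_append, ih]
    simp only [List.foldl_cons, List.foldl_nil]
    have h1 : fib t * (-1)^(t+1) - fib (t+1) * (-1)^t = fib (t+2) * (-1)^(t+1) := by
      rw [← fib_add_two]; ring
    have h2 : fib (t+1) * (-1)^t = fib (t+1) * (-1)^(t+2) := by
      rw [pow_add]; ring
    rw [h1, ← h2]
    congr 1
    have h3 : negItem (t+1) = fib (t+2) * (-1)^(t+1) := rfl
    rw [List.map_append, List.map_cons, List.map_nil, h3]

theorem B_eq_ref (num : Int) : Compose_Fibonacci_lst_alt num = refFib num := by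
  unfold Compose_Fibonacci_lst_alt refFib
  by_cases h : num ≤ 0
  · rw [if_pos h]
    have : num.toNat = 0 := by omega
    rw [this]
    simp [posL, negL]
  · rw [if_neg h]
    obtain ⟨t, ht⟩ : ∃ t, num.toNat = t + 1 := ⟨num.toNat - 1, by omega⟩
    have h1 : (num - 1).toNat = t := by omega
    rw [h1, ht, B_pos t, B_neg t]
    simp [negL]

theorem Compose_Fibonacci_lst_spec : Claim_equal_Compose_Fibonacci_lst := by
  intro num _
  unfold Spec_Compose_Fibonacci_lst
  rw [A_eq_ref, B_eq_ref]
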